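-- pv_equiv track=rewrite | github.com/pokerdio/generic | e/e-321.py | solve
-- ===== SOURCE A (Python) =====
-- def solve(n=100000):
--     triangles = set(x * (x + 1) // 2 for x in range(1, n))
--     ret = []
--     for i in range(1, n):
--         k = i * (i + 2)
--         if k in triangles:
--             ret.append(i)
--             if len(ret) == 40:
--                 return ret
--     return ret
-- ===== SOURCE B (Python) =====
-- def solve(n=100000):
--     ret = []
--     x = 1
--     for i in range(1, n):
--         k = i * (i + 2)
--         while x < n and x * (x + 1) // 2 < k:
--             x += 1
--         if x < n and x * (x + 1) // 2 == k:
--             ret.append(i)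
--             if len(ret) == 40:
--                 break
--     return ret
-- ===== Notes on version B (the rewrite author's own statement) =====
-- stated objective: faster
-- what changed: B drops A's precomputed n-element hash set of triangular numbers and instead advances a second pointer over the increasing triangular sequence in step with the candidate sequence, a one-pass merge using constant extra memory.
import Mathlib
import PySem

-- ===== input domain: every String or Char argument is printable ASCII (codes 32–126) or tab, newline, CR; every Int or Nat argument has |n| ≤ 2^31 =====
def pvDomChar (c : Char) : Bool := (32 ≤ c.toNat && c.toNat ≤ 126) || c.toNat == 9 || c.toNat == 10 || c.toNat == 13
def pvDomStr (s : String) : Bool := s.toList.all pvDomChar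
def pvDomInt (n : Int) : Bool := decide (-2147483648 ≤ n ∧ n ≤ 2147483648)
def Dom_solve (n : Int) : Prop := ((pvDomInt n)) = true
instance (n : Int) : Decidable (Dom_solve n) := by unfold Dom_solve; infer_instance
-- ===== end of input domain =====

-- B replaces A's precomputed set of triangular numbers by a second pointer advanced in
-- step with the candidate index (a one-pass merge of two increasing sequences), in O(1) memory.

-- ===== PORT A =====
-- Python's 'set(...)' here is only ever used for membership tests; it is ported as a
-- Std.HashSet (exact same membership semantics on Int) so that the port is evaluable.
def trianglesSet (n : Int) : Std.HashSet Int :=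
  Std.HashSet.ofList ((PySem.List.pyRange 1 n 1).map (fun x => PySem.Int.floordiv (x * (x + 1)) 2))

def solveLoopA (triangles : Std.HashSet Int) : List Int → List Int → List Int
  | [], ret => ret
  | i :: rest, ret =>
    let k := i * (i + 2)
    if triangles.contains k then
      let ret' := ret ++ [i]
      if ret'.length = 40 then ret' else solveLoopA triangles rest ret'
    else solveLoopA triangles rest ret

def solve (n : Int) : List Int :=
  solveLoopA (trianglesSet n) (PySem.List.pyRange 1 n 1) []

-- ===== PORT B =====
-- the inner 'while x < n and x*(x+1)//2 < k: x += 1' loop of Source B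
def advanceX (n k x : Int) : Int :=
  if x < n ∧ PySem.Int.floordiv (x * (x + 1)) 2 < k then advanceX n k (x + 1) else x
termination_by (n - x).toNat
decreasing_by omega

def solveAltLoop (n : Int) : List Int → Int → List Int → List Int
  | [], _, ret => ret
  | i :: rest, x, ret =>
    let k := i * (i + 2)
    let x' := advanceX n k x
    if x' < n ∧ PySem.Int.floordiv (x' * (x' + 1)) 2 = k then
      let ret' := ret ++ [i]
      if ret'.length = 40 then ret' else solveAltLoop n rest x' ret'
    else solveAltLoop n rest x' ret

def solve_alt (n : Int) : List Int := solveAltLoop n (PySem.List.pyRange 1 n 1) 1 []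

-- ===== PRECONDITION & SPEC =====
def Spec_solve (n : Int) (out : List Int) : Prop := out = solve_alt n
instance (n : Int) (out : List Int) : Decidable (Spec_solve n out) := by unfold Spec_solve; infer_instance

-- ===== CLAIM (what is proved, stated in full; the proofs are below) =====
def Claim_equal_solve : Prop := ∀ (n : Int), Dom_solve n → Spec_solve n (solve n)

-- ===== LEMMAS AND PROOFS =====

-- two times the floordiv-triangular number
theorem two_mul_tri (x : Int) : 2 * PySem.Int.floordiv (x * (x + 1)) 2 = x * (x + 1) := by
  rw [PySem.Int.floordiv_eq_ediv_of_pos (by norm_num : (0:Int) < 2)]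
  exact Int.mul_ediv_cancel' (Int.even_mul_succ_self x).two_dvd

-- strict monotonicity of x ↦ x*(x+1)//2 on 0 ≤ x
theorem tri_lt (a b : Int) (ha : 0 ≤ a) (hab : a < b) :
    PySem.Int.floordiv (a * (a + 1)) 2 < PySem.Int.floordiv (b * (b + 1)) 2 := by
  have h1 := two_mul_tri a
  have h2 := two_mul_tri b
  have h3 : a * (a + 1) < b * (b + 1) := by nlinarith
  omega

theorem mem_triangles (n k : Int) :
    ((trianglesSet n).contains k = true) ↔
      ∃ x, (1 ≤ x ∧ x < n) ∧ PySem.Int.floordiv (x * (x + 1)) 2 = k := by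
  rw [trianglesSet, Std.HashSet.contains_iff_mem, Std.HashSet.mem_ofList,
    List.contains_iff_mem, List.mem_map]
  simp only [PySem.List.mem_pyRange_one]

-- what the inner while loop computes
theorem advance_spec (n k : Int) : ∀ (fuel : Nat) (x : Int), (n - x).toNat = fuel →
    x ≤ advanceX n k x ∧
    (∀ y, x ≤ y → y < advanceX n k x → PySem.Int.floordiv (y * (y + 1)) 2 < k) ∧
    (advanceX n k x < n → ¬ PySem.Int.floordiv (advanceX n k x * (advanceX n k x + 1)) 2 < k) := by
  intro fuel
  induction fuel with
  | zero =>
    intro x hf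
    have hnx : n ≤ x := by omega
    rw [advanceX, if_neg (by omega : ¬ (x < n ∧ PySem.Int.floordiv (x * (x + 1)) 2 < k))]
    exact ⟨le_rfl, fun y h1 h2 => absurd h2 (by omega), fun h => by omega⟩
  | succ f ihf =>
    intro x hf
    by_cases hcond : x < n ∧ PySem.Int.floordiv (x * (x + 1)) 2 < k
    · rw [advanceX, if_pos hcond]
      obtain ⟨h1, h2, h3⟩ := ihf (x + 1) (by omega)
      refine ⟨by omega, ?_, h3⟩
      intro y hy1 hy2
      rcases eq_or_lt_of_le hy1 with h | h
      · rw [← h]; exact hcond.2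
      · exact h2 y (by omega) hy2
    · rw [advanceX, if_neg hcond]
      exact ⟨le_rfl, fun y h1 h2 => absurd h2 (by omega),
        fun h htri => hcond ⟨h, htri⟩⟩

-- the key pointwise equivalence: given the pointer invariant, set membership of k = i*(i+2)
-- agrees with B's test at the advanced pointer; the invariant is carried to the new pointer
theorem cond_equiv (n k x : Int) (hx1 : 1 ≤ x)
    (hinv : ∀ y, 1 ≤ y → y < x → PySem.Int.floordiv (y * (y + 1)) 2 < k) :
    (((trianglesSet n).contains k = true) ↔
      (advanceX n k x < n ∧
        PySem.Int.floordiv (advanceX n k x * (advanceX n k x + 1)) 2 = k)) ∧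
    (∀ y, 1 ≤ y → y < advanceX n k x → PySem.Int.floordiv (y * (y + 1)) 2 < k) := by
  obtain ⟨h1, h2, h3⟩ := advance_spec n k (n - x).toNat x rfl
  have hinv' : ∀ y, 1 ≤ y → y < advanceX n k x →
      PySem.Int.floordiv (y * (y + 1)) 2 < k := by
    intro y hy1 hy2
    by_cases hyx : y < x
    · exact hinv y hy1 hyx
    · exact h2 y (by omega) hy2
  refine ⟨?_, hinv'⟩
  rw [mem_triangles]
  constructor
  · rintro ⟨y, ⟨hy1, hyn⟩, hy⟩
    have hyx' : ¬ y < advanceX n k x := fun h => absurd hy (by have := hinv' y hy1 h; omega)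
    have hxn : advanceX n k x < n := by omega
    have hge : ¬ PySem.Int.floordiv (advanceX n k x * (advanceX n k x + 1)) 2 < k := h3 hxn
    rcases eq_or_lt_of_le (not_lt.mp hyx') with h | h
    · exact ⟨hxn, by rw [h]; exact hy⟩
    · exact absurd (by have := tri_lt (advanceX n k x) y (by omega) h; omega :
        PySem.Int.floordiv (advanceX n k x * (advanceX n k x + 1)) 2 < k) hge
  · rintro ⟨hxn, hxk⟩
    exact ⟨advanceX n k x, ⟨by omega, hxn⟩, hxk⟩

theorem loop_agree (n : Int) : ∀ (fuel : Nat) (i x : Int) (ret : List Int),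
    (n - i).toNat = fuel → 1 ≤ i → 1 ≤ x →
    (∀ y, 1 ≤ y → y < x → PySem.Int.floordiv (y * (y + 1)) 2 < i * (i + 2)) →
    solveLoopA (trianglesSet n) (PySem.List.pyRange i n 1) ret =
      solveAltLoop n (PySem.List.pyRange i n 1) x ret := by
  intro fuel
  induction fuel with
  | zero =>
    intro i x ret hf _ _ _
    rw [PySem.List.pyRange_one_eq_nil (by omega : n ≤ i)]
    rfl
  | succ f ihf =>
    intro i x ret hf h1 hx1 hinv
    by_cases hin : i < n
    · rw [PySem.List.pyRange_one_cons hin]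
      simp only [solveLoopA, solveAltLoop]
      obtain ⟨hmem, hinv'⟩ := cond_equiv n (i * (i + 2)) x hx1 hinv
      have hx'1 : 1 ≤ advanceX n (i * (i + 2)) x :=
        le_trans hx1 (advance_spec n (i * (i + 2)) (n - x).toNat x rfl).1
      have hinv2 : ∀ y, 1 ≤ y → y < advanceX n (i * (i + 2)) x →
          PySem.Int.floordiv (y * (y + 1)) 2 < (i + 1) * ((i + 1) + 2) := by
        intro y hy1 hy2
        have hk : i * (i + 2) < (i + 1) * ((i + 1) + 2) := by nlinarith
        have := hinv' y hy1 hy2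
        omega
      cases hcond : (trianglesSet n).contains (i * (i + 2)) with
      | true =>
        obtain ⟨hP, hQ⟩ := hmem.mp hcond
        rw [if_pos (rfl : (true : Bool) = true), if_pos (⟨hP, hQ⟩ :
          advanceX n (i * (i + 2)) x < n ∧
            PySem.Int.floordiv (advanceX n (i * (i + 2)) x *
              (advanceX n (i * (i + 2)) x + 1)) 2 = i * (i + 2))]
        by_cases h40 : (ret ++ [i]).length = 40
        · rw [if_pos h40, if_pos h40]
        · rw [if_neg h40, if_neg h40]
          exact ihf (i + 1) (advanceX n (i * (i + 2)) x) (ret ++ [i]) (by omega) (by omega)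
            hx'1 hinv2
      | false =>
        rw [if_neg (Bool.false_ne_true :  ¬ ((false : Bool) = true)),
          if_neg (fun h => by have hc := hmem.mpr h; rw [hcond] at hc; exact Bool.noConfusion hc :
            ¬ (advanceX n (i * (i + 2)) x < n ∧
              PySem.Int.floordiv (advanceX n (i * (i + 2)) x *
                (advanceX n (i * (i + 2)) x + 1)) 2 = i * (i + 2)))]
        exact ihf (i + 1) (advanceX n (i * (i + 2)) x) ret (by omega) (by omega) hx'1 hinv2
    · rw [PySem.List.pyRange_one_eq_nil (by omega : n ≤ i)]
      rfl

-- ===== VERDICT (by name: the statement is the Claim_ definition above) =====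
theorem solve_spec : Claim_equal_solve := by
  intro n _
  unfold Spec_solve solve solve_alt
  exact loop_agree n (n - 1).toNat 1 1 [] rfl le_rfl le_rfl (fun y h1 h2 => absurd h2 (by omega))
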